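-- pv_equiv track=rewrite | github.com/arnabid/QA | graphs/sumofDistances.py | getSODbfs
-- ===== SOURCE A (Python) =====
-- import queue
--
-- def getSODbfs(graph, root):
-- 	q = queue.Queue()
-- 	q.put((root, 0))
-- 	visited = set()
-- 	visited.add(root)
-- 	ans = 0
-- 	while not q.empty():
-- 		v, l = q.get()
-- 		ans += l
-- 		for w in graph[v]:
-- 			if w not in visited:
-- 				q.put((w, l+1))
-- 				visited.add(w)
-- 	return ans
-- ===== SOURCE B (Python) =====
-- def getSODbfs(graph, root):
--     frontier = [root]
--     visited = {root}
--     level = 0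
--     ans = 0
--     while frontier:
--         ans += level * len(frontier)
--         nxt = []
--         for v in frontier:
--             for w in graph[v]:
--                 if w not in visited:
--                     visited.add(w)
--                     nxt.append(w)
--         frontier = nxt
--         level += 1
--     return ans
-- ===== Notes on version B (the rewrite author's own statement) =====
-- stated objective: alternative
-- what changed: Replaces the FIFO queue of (node, distance) pairs by level-synchronous BFS: a frontier list per depth, adding level*len(frontier) each round, so no per-node distance is stored or dequeued.
import Mathlib
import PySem

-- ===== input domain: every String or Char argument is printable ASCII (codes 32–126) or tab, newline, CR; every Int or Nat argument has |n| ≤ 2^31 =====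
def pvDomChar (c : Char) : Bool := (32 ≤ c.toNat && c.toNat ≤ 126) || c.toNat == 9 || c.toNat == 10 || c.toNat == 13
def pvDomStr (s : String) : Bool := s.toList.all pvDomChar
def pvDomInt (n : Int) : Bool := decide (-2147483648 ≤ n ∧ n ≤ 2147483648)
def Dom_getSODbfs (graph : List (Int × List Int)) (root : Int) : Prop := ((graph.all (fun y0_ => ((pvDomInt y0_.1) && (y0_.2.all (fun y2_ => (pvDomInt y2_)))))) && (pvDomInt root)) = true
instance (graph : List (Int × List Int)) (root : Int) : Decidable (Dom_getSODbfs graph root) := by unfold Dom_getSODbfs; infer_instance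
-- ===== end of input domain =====

-- B replaces A's FIFO queue of (node, distance) pairs by level-synchronous BFS (frontier per depth); same cost, different decomposition.

-- graph[v] (KeyError excluded by Pre_; getD [] is exact whenever v is a key)
def pvNbrs (graph : List (Int × List Int)) (v : Int) : List Int :=
  PySem.Dict.getD (PySem.Dict.mk graph) v []

-- all ints occurring in adjacency lists (termination measure support)
def pvAllN (graph : List (Int × List Int)) : List Int := (graph.map Prod.snd).flatten

def pvCnt (graph : List (Int × List Int)) (vis : PySem.Set Int) : Nat :=
  ((pvAllN graph).filter (fun x => decide (x ∉ vis))).length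

theorem pvNbrs_subset (graph : List (Int × List Int)) (v : Int) :
    ∀ w ∈ pvNbrs graph v, w ∈ pvAllN graph := by
  induction graph with
  | nil =>
    intro w hw
    have : PySem.Dict.mk ([] : List (Int × List Int)) = PySem.Dict.empty := rfl
    rw [pvNbrs, this, PySem.Dict.getD_empty] at hw
    cases hw
  | cons p rest ih =>
    intro w hw
    simp only [pvNbrs, PySem.Dict.getD_eq_get?_getD] at hw ih
    rcases p with ⟨k, ns⟩
    rw [PySem.Dict.get?_mk_cons] at hw
    by_cases hk : k == v
    · simp [hk] at hw
      simp [pvAllN, hw]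
    · simp [hk] at hw
      have := ih w (by simpa using hw)
      simp [pvAllN] at this ⊢
      exact Or.inr this

theorem pvCnt_add_lt (graph : List (Int × List Int)) (vis : PySem.Set Int) (w : Int)
    (h1 : w ∈ pvAllN graph) (h2 : w ∉ vis) :
    pvCnt graph (PySem.Set.add vis w) < pvCnt graph vis := by
  unfold pvCnt
  have hsub : List.Sublist ((pvAllN graph).filter (fun x => decide (x ∉ PySem.Set.add vis w)))
      ((pvAllN graph).filter (fun x => decide (x ∉ vis))) := by
    apply List.monotone_filter_right
    intro x hx
    simp only [decide_eq_true_eq, PySem.Set.mem_add] at *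
    tauto
  have hle := hsub.length_le
  rcases Nat.lt_or_ge ((pvAllN graph).filter (fun x => decide (x ∉ PySem.Set.add vis w))).length
      ((pvAllN graph).filter (fun x => decide (x ∉ vis))).length with h | h
  · exact h
  · exfalso
    have heq := hsub.eq_of_length (Nat.le_antisymm hle h)
    have hw : w ∈ (pvAllN graph).filter (fun x => decide (x ∉ vis)) := by
      simp [h1, h2]
    rw [← heq] at hw
    simp [PySem.Set.mem_add] at hw

-- ===== PORT A =====
def pvStepA (l : Int) (st : List (Int × Int) × PySem.Set Int) (w : Int) :
    List (Int × Int) × PySem.Set Int :=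
  if w ∈ st.2 then st else (st.1 ++ [(w, l + 1)], PySem.Set.add st.2 w)

theorem pvBoundA (graph : List (Int × List Int)) (l : Int) :
    ∀ (ns : List Int), (∀ w ∈ ns, w ∈ pvAllN graph) →
    ∀ (acc : List (Int × Int)) (vis : PySem.Set Int),
      (ns.foldl (pvStepA l) (acc, vis)).1.length + 2 * pvCnt graph (ns.foldl (pvStepA l) (acc, vis)).2
        ≤ acc.length + 2 * pvCnt graph vis := by
  intro ns
  induction ns with
  | nil => intro _ acc vis; simp
  | cons w ns ih =>
    intro hsub acc vis
    simp only [List.foldl_cons]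
    by_cases hw : w ∈ vis
    · simp only [pvStepA, hw, if_true]
      exact ih (fun x hx => hsub x (List.mem_cons_of_mem _ hx)) acc vis
    · simp only [pvStepA, hw, if_false]
      have h1 := ih (fun x hx => hsub x (List.mem_cons_of_mem _ hx)) (acc ++ [(w, l + 1)]) (PySem.Set.add vis w)
      have h2 := pvCnt_add_lt graph vis w (hsub w (List.mem_cons_self)) hw
      simp only [List.length_append, List.length_cons, List.length_nil] at h1 ⊢
      omega

def pvLoopA (graph : List (Int × List Int)) : List (Int × Int) → PySem.Set Int → Int → Int
  | [], _, ans => ans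
  | (v, l) :: rest, vis, ans =>
    let st := (pvNbrs graph v).foldl (pvStepA l) (rest, vis)
    pvLoopA graph st.1 st.2 (ans + l)
termination_by q vis _ => q.length + 2 * pvCnt graph vis
decreasing_by
  have h := pvBoundA graph l (pvNbrs graph v) (pvNbrs_subset graph v) rest vis
  simp only [List.length_cons]
  omega

def getSODbfs (graph : List (Int × List Int)) (root : Int) : Int :=
  pvLoopA graph [(root, 0)] (PySem.Set.add PySem.Set.empty root) 0

-- ===== PORT B =====
def pvStepB (st : List Int × PySem.Set Int) (w : Int) : List Int × PySem.Set Int :=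
  if w ∈ st.2 then st else (st.1 ++ [w], PySem.Set.add st.2 w)

def pvExpand (graph : List (Int × List Int)) (frontier : List Int)
    (st : List Int × PySem.Set Int) : List Int × PySem.Set Int :=
  frontier.foldl (fun st v => (pvNbrs graph v).foldl pvStepB st) st

theorem pvBoundB_inner (graph : List (Int × List Int)) :
    ∀ (ns : List Int), (∀ w ∈ ns, w ∈ pvAllN graph) →
    ∀ (acc : List Int) (vis : PySem.Set Int),
      (ns.foldl pvStepB (acc, vis)).1.length + pvCnt graph (ns.foldl pvStepB (acc, vis)).2
        ≤ acc.length + pvCnt graph vis := by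
  intro ns
  induction ns with
  | nil => intro _ acc vis; simp
  | cons w ns ih =>
    intro hsub acc vis
    simp only [List.foldl_cons]
    by_cases hw : w ∈ vis
    · simp only [pvStepB, hw, if_true]
      exact ih (fun x hx => hsub x (List.mem_cons_of_mem _ hx)) acc vis
    · simp only [pvStepB, hw, if_false]
      have h1 := ih (fun x hx => hsub x (List.mem_cons_of_mem _ hx)) (acc ++ [w]) (PySem.Set.add vis w)
      have h2 := pvCnt_add_lt graph vis w (hsub w (List.mem_cons_self)) hw
      simp only [List.length_append, List.length_cons, List.length_nil] at h1 ⊢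
      omega

theorem pvBoundB (graph : List (Int × List Int)) :
    ∀ (frontier : List Int) (acc : List Int) (vis : PySem.Set Int),
      (pvExpand graph frontier (acc, vis)).1.length + pvCnt graph (pvExpand graph frontier (acc, vis)).2
        ≤ acc.length + pvCnt graph vis := by
  intro frontier
  induction frontier with
  | nil => intro acc vis; simp [pvExpand]
  | cons v fr ih =>
    intro acc vis
    simp only [pvExpand, List.foldl_cons] at ih ⊢
    have h1 := pvBoundB_inner graph (pvNbrs graph v) (pvNbrs_subset graph v) acc vis
    have h2 := ih ((pvNbrs graph v).foldl pvStepB (acc, vis)).1 ((pvNbrs graph v).foldl pvStepB (acc, vis)).2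
    simp only [Prod.mk.eta] at h2
    omega

def pvLoopB (graph : List (Int × List Int)) (frontier : List Int) (vis : PySem.Set Int)
    (level ans : Int) : Int :=
  match frontier with
  | [] => ans
  | _ :: _ =>
    let st := pvExpand graph frontier ([], vis)
    pvLoopB graph st.1 st.2 (level + 1) (ans + level * (frontier.length : Int))
termination_by pvCnt graph vis + frontier.length
decreasing_by
  have h := pvBoundB graph frontier [] vis
  simp only [List.length_nil, List.length_cons] at h ⊢
  omega

def getSODbfs_alt (graph : List (Int × List Int)) (root : Int) : Int :=
  pvLoopB graph [root] (PySem.Set.ofList [root]) 0 0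

-- ===== PRECONDITION & SPEC =====
-- nodes reachable from root: |graph| rounds of neighbor expansion = the reflexive-transitive
-- closure of the edge relation (a shortest path passes through distinct keys, so ≤ |graph| steps)
def pvReachSet (graph : List (Int × List Int)) (root : Int) : List Int :=
  (fun s => PySem.Set.update s (s.flatMap (fun v => pvNbrs graph v)))^[graph.length] [root]

-- Pre_ excludes inputs where A raises KeyError (a node reachable from root missing from the dict)
-- and assoc lists whose duplicate keys carry conflicting adjacency lists, where the dict A
-- actually receives is not determined by the association list.
def Pre_getSODbfs (graph : List (Int × List Int)) (root : Int) : Prop :=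
  (∀ p ∈ graph, ∀ q ∈ graph, p.1 = q.1 → p.2 = q.2) ∧
    ∀ v ∈ pvReachSet graph root, v ∈ graph.map Prod.fst
instance (graph : List (Int × List Int)) (root : Int) : Decidable (Pre_getSODbfs graph root) := by
  unfold Pre_getSODbfs; infer_instance

def pvWitness_getSODbfs : (List (Int × List Int)) × Int := ([(0, [1]), (1, [0])], 0)

def Spec_getSODbfs (graph : List (Int × List Int)) (root : Int) (out : Int) : Prop := out = getSODbfs_alt graph root
instance (graph : List (Int × List Int)) (root : Int) (out : Int) : Decidable (Spec_getSODbfs graph root out) := by unfold Spec_getSODbfs; infer_instance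

-- ===== CLAIM (what is proved, stated in full; the proofs are below) =====
def Claim_equal_getSODbfs : Prop := ∀ (graph : List (Int × List Int)) (root : Int), Dom_getSODbfs graph root → Pre_getSODbfs graph root → Spec_getSODbfs graph root (getSODbfs graph root)

-- ===== LEMMAS AND PROOFS =====

-- inner loop: A's enqueueing of (w, l+1) pairs tracks B's enqueueing of the nodes w
theorem pvInnerAB (l : Int) :
    ∀ (ns : List Int) (rest : List (Int × Int)) (N : List Int) (vis : PySem.Set Int),
      ns.foldl (pvStepA l) (rest ++ N.map (fun v => (v, l + 1)), vis)
        = (rest ++ ((ns.foldl pvStepB (N, vis)).1).map (fun v => (v, l + 1)),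
           (ns.foldl pvStepB (N, vis)).2) := by
  intro ns
  induction ns with
  | nil => intro rest N vis; simp
  | cons w ns ih =>
    intro rest N vis
    simp only [List.foldl_cons]
    by_cases hw : w ∈ vis
    · simp only [pvStepA, pvStepB, hw, if_true]
      exact ih rest N vis
    · simp only [pvStepA, pvStepB, hw, if_false]
      have := ih rest (N ++ [w]) (PySem.Set.add vis w)
      simpa [List.map_append, List.append_assoc] using this

-- one whole BFS level of A's queue equals one frontier expansion of B
theorem pvLevelAB (graph : List (Int × List Int)) (l : Int) :
    ∀ (F N : List Int) (vis : PySem.Set Int) (ans : Int),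
      pvLoopA graph (F.map (fun v => (v, l)) ++ N.map (fun v => (v, l + 1))) vis ans
        = pvLoopA graph ((pvExpand graph F (N, vis)).1.map (fun v => (v, l + 1)))
            (pvExpand graph F (N, vis)).2 (ans + l * (F.length : Int)) := by
  intro F
  induction F with
  | nil => intro N vis ans; simp [pvExpand]
  | cons v F ih =>
    intro N vis ans
    simp only [List.map_cons, List.cons_append]
    rw [pvLoopA]
    rw [pvInnerAB]
    rw [ih]
    have hst : pvExpand graph (v :: F) (N, vis)
        = pvExpand graph F ((pvNbrs graph v).foldl pvStepB (N, vis)) := by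
      simp [pvExpand]
    rw [hst]
    have : ans + l + l * (F.length : Int) = ans + l * ((v :: F).length : Int) := by
      simp only [List.length_cons]
      push_cast
      ring
    rw [this]

-- A's queue BFS from a single-level queue equals B's level-synchronous BFS
theorem pvLoopAB (graph : List (Int × List Int)) :
    ∀ (n : Nat) (F : List Int) (vis : PySem.Set Int) (l ans : Int),
      pvCnt graph vis + F.length = n →
      pvLoopA graph (F.map (fun v => (v, l))) vis ans = pvLoopB graph F vis l ans := by
  intro n
  induction n using Nat.strong_induction_on with
  | _ n ih =>
    intro F vis l ans hn
    cases F with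
    | nil => simp [pvLoopA, pvLoopB]
    | cons v F =>
      rw [show ((v :: F).map (fun v => (v, l)))
            = (v :: F).map (fun v => (v, l)) ++ ([] : List Int).map (fun v => (v, l + 1)) by simp]
      rw [pvLevelAB]
      have hb := pvBoundB graph (v :: F) [] vis
      set st := pvExpand graph (v :: F) ([], vis) with hstdef
      have hlt : pvCnt graph st.2 + st.1.length < n := by
        simp only [List.length_nil] at hb
        simp only [List.length_cons] at hn
        omega
      rw [ih _ hlt st.1 st.2 (l + 1) (ans + l * ((v :: F).length : Int)) rfl]
      conv_rhs => rw [pvLoopB]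

-- ===== VERDICT (by name: the statement is the Claim_ definition above) =====
theorem getSODbfs_spec : Claim_equal_getSODbfs := by
  intro graph root _ _
  unfold Spec_getSODbfs getSODbfs getSODbfs_alt
  have h := pvLoopAB graph (pvCnt graph (PySem.Set.ofList [root]) + 1) [root] (PySem.Set.ofList [root]) 0 0 rfl
  have hv : PySem.Set.add PySem.Set.empty root = PySem.Set.ofList [root] := by
    simp [PySem.Set.ofList_eq_foldl]
  rw [hv]
  simpa using h
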